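-- pv_equiv track=rewrite | github.com/Kapitolina999/HW_23 | utils.py | get_cmd
-- ===== SOURCE A (Python) =====
-- from typing import Iterable, Iterator, Generator, List, Any, Union
--
-- def get_cmd(query: dict) -> Generator:
--     del query["file_name"]
--     buf: List[str] = []
--
--     for item in query.values():
--         buf.append(item)
--         if len(buf) == 2:
--             yield buf
--             buf = []
-- ===== SOURCE B (Python) =====
-- def get_cmd(query: dict):
--     del query["file_name"]
--     values = list(query.values())
--     while len(values) >= 2:
--         yield values[:2]
--         values = values[2:]
-- ===== Notes on version B (the rewrite author's own statement) =====
-- stated objective: simpler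
-- what changed: B materializes the remaining dict values once and destructures that list by slicing (head pair / rest) in a while loop, instead of A's grow-and-reset two-element buffer inside a for loop over the values.
import Mathlib
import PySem

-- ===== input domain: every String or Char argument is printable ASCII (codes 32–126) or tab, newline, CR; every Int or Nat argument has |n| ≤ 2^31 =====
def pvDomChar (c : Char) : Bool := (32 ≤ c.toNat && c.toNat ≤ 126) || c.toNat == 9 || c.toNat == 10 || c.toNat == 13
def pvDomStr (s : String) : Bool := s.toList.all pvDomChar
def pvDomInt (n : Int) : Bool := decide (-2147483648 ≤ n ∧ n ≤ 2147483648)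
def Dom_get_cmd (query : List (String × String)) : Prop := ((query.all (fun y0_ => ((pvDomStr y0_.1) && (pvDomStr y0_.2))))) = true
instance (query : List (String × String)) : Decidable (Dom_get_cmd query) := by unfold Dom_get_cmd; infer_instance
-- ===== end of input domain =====

-- B replaces A's grow-and-reset buffer with a while loop slicing a materialized values
-- list (objective: simpler). Both Pythons mutate `query` identically (del "file_name");
-- the equivalence proved here is about the returned (yielded) values.

-- ===== PORT A =====
-- del query["file_name"]; then fold over the remaining values with a 2-element buffer.
def pvStepA (st : List String × List (List String)) (item : String) :
    List String × List (List String) :=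
  let buf := st.1 ++ [item]
  if buf.length = 2 then ([], st.2 ++ [buf]) else (buf, st.2)

def get_cmd (query : List (String × String)) : List (List String) :=
  let d := (PySem.Dict.ofList query).erase "file_name"
  (d.values.foldl pvStepA ([], [])).2

-- ===== PORT B =====
-- while len(values) >= 2: yield values[:2]; values = values[2:]
def get_cmd_altLoop (values : List String) : List (List String) :=
  if values.length ≥ 2 then
    PySem.List.slice values none (some 2) ::
      get_cmd_altLoop (PySem.List.slice values (some 2) none)
  else []
termination_by values.length
decreasing_by
  simp only [show ((2:Int)) = ((2:Nat) : Int) from rfl, PySem.List.slice_from_natCast,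
    List.length_drop]
  omega

def get_cmd_alt (query : List (String × String)) : List (List String) :=
  let values := ((PySem.Dict.ofList query).erase "file_name").values
  get_cmd_altLoop values

-- ===== PRECONDITION & SPEC =====
-- Pre_ excludes exactly the inputs where Python A raises KeyError: no "file_name" key
-- (B raises there too).
def Pre_get_cmd (query : List (String × String)) : Prop :=
  "file_name" ∈ query.map Prod.fst
instance (query : List (String × String)) : Decidable (Pre_get_cmd query) := by
  unfold Pre_get_cmd; infer_instance

def pvWitness_get_cmd : (List (String × String)) :=
  [("file_name", "f.txt"), ("a", "1"), ("b", "2"), ("c", "3")]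

def Spec_get_cmd (query : List (String × String)) (out : List (List String)) : Prop := out = get_cmd_alt query
instance (query : List (String × String)) (out : List (List String)) : Decidable (Spec_get_cmd query out) := by unfold Spec_get_cmd; infer_instance

-- ===== CLAIM (what is proved, stated in full; the proofs are below) =====
def Claim_equal_get_cmd : Prop := ∀ (query : List (String × String)), Dom_get_cmd query → Pre_get_cmd query → Spec_get_cmd query (get_cmd query)

-- ===== LEMMAS AND PROOFS =====

-- the common chunking both loops compute
def pvPairs : List String → List (List String)
  | x :: y :: t => [x, y] :: pvPairs t
  | _ => []

theorem pvStepA_empty (out : List (List String)) (x : String) :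
    pvStepA ([], out) x = ([x], out) := by simp [pvStepA]

theorem pvStepA_one (out : List (List String)) (x y : String) :
    pvStepA ([x], out) y = ([], out ++ [[x, y]]) := by simp [pvStepA]

theorem pvFoldA_eq_pairs : ∀ (l : List String) (out : List (List String)),
    (l.foldl pvStepA ([], out)).2 = out ++ pvPairs l
  | [], out => by simp [pvPairs]
  | [x], out => by simp [pvPairs, List.foldl, pvStepA_empty]
  | x :: y :: t, out => by
      rw [List.foldl_cons, List.foldl_cons, pvStepA_empty, pvStepA_one,
        pvFoldA_eq_pairs t (out ++ [[x, y]])]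
      simp [pvPairs]

theorem pvAltLoop_eq_pairs : ∀ (l : List String), get_cmd_altLoop l = pvPairs l
  | [] => by rw [get_cmd_altLoop]; simp [pvPairs]
  | [x] => by rw [get_cmd_altLoop]; simp [pvPairs]
  | x :: y :: t => by
      rw [get_cmd_altLoop]
      have h2 : ((2:Int)) = ((2:Nat) : Int) := rfl
      simp only [h2, PySem.List.slice_to_natCast, PySem.List.slice_from_natCast,
        List.length_cons, List.take_succ_cons, List.drop_succ_cons, List.take_zero,
        List.drop_zero]
      rw [if_pos (by omega)]
      rw [pvAltLoop_eq_pairs t]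
      simp [pvPairs]

-- ===== VERDICT (by name: the statement is the Claim_ definition above) =====
theorem get_cmd_spec : Claim_equal_get_cmd := by
  intro query _ _
  unfold Spec_get_cmd get_cmd get_cmd_alt
  rw [pvAltLoop_eq_pairs, pvFoldA_eq_pairs]
  simp
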